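-- pv_equiv track=rewrite | github.com/PradyotC/Sequence-Alignment | check.py | genStrings
-- ===== SOURCE A (Python) =====
-- def genStrings(inp):
--     strings = []
--     str1 = None
--     for i in inp:
--         if i.isalpha():
--             if str1:
--                 strings.append(str1)
--             str1 = i
--         else:
--             str1 = str1[:int(i)+1]+str1+str1[int(i)+1:]
--     strings.append(str1)
--     return strings
-- ===== SOURCE B (Python) =====
-- def genStrings(inp):
--     # Staged algorithm: (1) group the tokens into (letter, [commands]); (2) for
--     # each group, never build intermediate strings: precompute the clamped
--     # insertion point of every doubling step, then emit each character of the
--     # final string directly by tracing its index back through the insertions.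
--     groups = []
--     for tok in inp:
--         if tok.isalpha():
--             groups.append((tok, []))
--         else:
--             groups[-1][1].append(int(tok))
--     out = []
--     for letter, ks in groups:
--         n = len(letter)
--         pts = []
--         ln = n
--         for k in ks:
--             kk = k + 1
--             p = max(ln + kk, 0) if kk < 0 else min(kk, ln)
--             pts.append((ln, p))
--             ln *= 2
--         chars = []
--         for i in range(ln):
--             j = i
--             for m, p in reversed(pts):
--                 if j < p:
--                     pass
--                 elif j < p + m:
--                     j -= p
--                 else:
--                     j -= m
--             chars.append(letter[j])
--         out.append(''.join(chars))
--     return out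
-- ===== Notes on version B (the rewrite author's own statement) =====
-- stated objective: alternative
-- what changed: A threads one string through a single pass, rebuilding it by slice-insertion at every digit; B stages the work: it first groups tokens into (letter, command-list) pairs, then for each group precomputes the clamped insertion points and lengths and emits every character of the final string directly by tracing its index back through the insertions, never materialising any intermediate string.
-- outside the precondition, e.g. on genStrings([]): A returns [None], B returns []
import Mathlib
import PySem

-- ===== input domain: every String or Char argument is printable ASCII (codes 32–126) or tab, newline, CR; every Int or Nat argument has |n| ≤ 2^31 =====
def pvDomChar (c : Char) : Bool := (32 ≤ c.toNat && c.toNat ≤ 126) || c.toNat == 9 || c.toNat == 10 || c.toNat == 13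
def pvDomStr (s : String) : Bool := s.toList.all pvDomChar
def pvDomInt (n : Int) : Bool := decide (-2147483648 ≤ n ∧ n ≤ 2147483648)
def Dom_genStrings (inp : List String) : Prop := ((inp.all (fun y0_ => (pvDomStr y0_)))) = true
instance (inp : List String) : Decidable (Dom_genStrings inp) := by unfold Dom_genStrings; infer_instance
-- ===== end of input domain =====

-- B replaces A's single pass (one string rebuilt by slice-insertion at every
-- digit token) by a staged algorithm: group tokens into (letter, commands),
-- precompute clamped insertion points, then emit each character of every
-- result directly by tracing its index back through the insertions (no
-- intermediate strings). Same values on Pre_ (objective: alternative).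

-- ===== PORT A =====
-- one step of A's for-loop; state = (strings, str1); str1 = none models Python's None
-- (where A would slice None and raise TypeError — excluded by Pre_ — the port keeps none)
def genStringsStep (st : List String × Option String) (i : String) : List String × Option String :=
  if PySem.Str.strIsalpha i then
    match st.2 with
    | some s => if s = "" then (st.1, some i) else (st.1 ++ [s], some i)  -- `if str1:` truthiness
    | none => (st.1, some i)
  else
    match st.2 with
    | some s =>
        let k := (PySem.Int.ofStr? i).getD 0 + 1   -- int(i); isSome under Pre_
        (st.1, some (PySem.Str.slice s none (some k) ++ s ++ PySem.Str.slice s (some k) none))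
    | none => (st.1, none)

def genStrings (inp : List String) : List String :=
  let st := inp.foldl genStringsStep ([], none)
  st.1 ++ [st.2.getD ""]   -- final strings.append(str1); str1 is some _ under Pre_

-- ===== PORT B =====
-- stage 1: one step of B's grouping loop (groups.append / groups[-1][1].append;
-- groups is nonempty at every digit under Pre_; the port keeps gs unchanged where
-- B's Python raises IndexError — outside Pre_)
def pvGroupStep (gs : List (String × List Int)) (tok : String) : List (String × List Int) :=
  if PySem.Str.strIsalpha tok then gs ++ [(tok, [])]
  else
    match gs.getLast? with
    | some g => gs.dropLast ++ [(g.1, g.2 ++ [(PySem.Int.ofStr? tok).getD 0])]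
    | none => gs

def pvGroups (inp : List String) : List (String × List Int) := inp.foldl pvGroupStep []

-- p = max(ln + kk, 0) if kk < 0 else min(kk, ln)
def pvPoint (ln : Nat) (kk : Int) : Nat := if kk < 0 then ((ln : Int) + kk).toNat else min kk.toNat ln

-- stage 2, first inner loop: collect (length, insertion point) per command, doubling ln
def pvPtsStep (st : Nat × List (Nat × Nat)) (k : Int) : Nat × List (Nat × Nat) :=
  (st.1 * 2, st.2 ++ [(st.1, pvPoint st.1 (k + 1))])

def pvPts (n : Nat) (ks : List Int) : Nat × List (Nat × Nat) := ks.foldl pvPtsStep (n, [])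

-- one step of the traceback (`for m, p in reversed(pts)`)
def pvTraceStep (j : Nat) (mp : Nat × Nat) : Nat :=
  if j < mp.2 then j else if j < mp.2 + mp.1 then j - mp.2 else j - mp.1

def pvTrace (pts : List (Nat × Nat)) (i : Nat) : Nat := pts.reverse.foldl pvTraceStep i

-- per-group: ''.join(letter[trace(i)] for i in range(ln)); the traced index is
-- always in range, so getD never takes its default
def pvGroupString (g : String × List Int) : String :=
  let cs := g.1.toList
  let st := pvPts cs.length g.2
  String.ofList ((List.range st.1).map (fun i => cs.getD (pvTrace st.2 i) 'a'))

def genStrings_alt (inp : List String) : List String := (pvGroups inp).map pvGroupString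

-- ===== PRECONDITION & SPEC =====
-- Pre_ excludes exactly the inputs where the Python A does not return a list of
-- strings: the empty list (A returns [None], not a list of str) and lists whose
-- first element is not alphabetic or that contain a non-alphabetic element not
-- parseable by int() (A raises TypeError/ValueError there).
def Pre_genStrings (inp : List String) : Prop :=
  inp ≠ [] ∧ PySem.Str.strIsalpha (inp.headD "") = true ∧
    ∀ i ∈ inp, PySem.Str.strIsalpha i = true ∨ (PySem.Int.ofStr? i).isSome = true
instance (inp : List String) : Decidable (Pre_genStrings inp) := by unfold Pre_genStrings; infer_instance

def pvWitness_genStrings : List String := (["a", "-3", "0", "b", " 7 "])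

def Spec_genStrings (inp : List String) (out : List String) : Prop := out = genStrings_alt inp
instance (inp : List String) (out : List String) : Decidable (Spec_genStrings inp out) := by unfold Spec_genStrings; infer_instance

-- ===== CLAIM (what is proved, stated in full; the proofs are below) =====
def Claim_equal_genStrings : Prop := ∀ (inp : List String), Dom_genStrings inp → Pre_genStrings inp → Spec_genStrings inp (genStrings inp)

-- ===== LEMMAS AND PROOFS =====

-- proof-side helpers: A's loop, regrouped recursively (the bridge between the two ports)

-- s[:k+1] + s + s[k+1:] for command k : Int — the expansion A performs at a digit
def pvExpandK (s : String) (k : Int) : String :=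
  PySem.Str.slice s none (some (k + 1)) ++ s ++ PySem.Str.slice s (some (k + 1)) none

def pvFoldE (s : String) (ks : List Int) : String := ks.foldl pvExpandK s

-- split a token list into the leading run of command values and the rest
def pvRunKs : List String → List Int × List String
  | [] => ([], [])
  | x :: xs =>
      if PySem.Str.strIsalpha x then ([], x :: xs)
      else
        let p := pvRunKs xs
        (((PySem.Int.ofStr? x).getD 0) :: p.1, p.2)

theorem pvRunKs_length_le (l : List String) : (pvRunKs l).2.length ≤ l.length := by
  induction l with
  | nil => simp [pvRunKs]
  | cons x xs ih =>
      simp only [pvRunKs]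
      split
      · simp
      · exact Nat.le_succ_of_le ih

-- recursive grouping of a token list whose head is a letter
def pvRecGroups : List String → List (String × List Int)
  | [] => []
  | x :: xs => (x, (pvRunKs xs).1) :: pvRecGroups (pvRunKs xs).2
termination_by l => l.length
decreasing_by exact Nat.lt_succ_of_le (pvRunKs_length_le xs)


theorem pvRunKs_cons_alpha {x : String} (xs : List String)
    (hx : PySem.Chars.strIsalpha x.toList = true) : pvRunKs (x :: xs) = ([], x :: xs) := by
  simp [pvRunKs, hx]

theorem pvRunKs_cons_not {x : String} (xs : List String)
    (hx : ¬ PySem.Chars.strIsalpha x.toList = true) :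
    pvRunKs (x :: xs) = (((PySem.Int.ofStr? x).getD 0) :: (pvRunKs xs).1, (pvRunKs xs).2) := by
  simp [pvRunKs, hx]

theorem pvRecGroups_nil : pvRecGroups [] = [] := by rw [pvRecGroups.eq_def]

theorem pvRecGroups_cons (x : String) (xs : List String) :
    pvRecGroups (x :: xs) = (x, (pvRunKs xs).1) :: pvRecGroups (pvRunKs xs).2 := by
  rw [pvRecGroups.eq_def]

theorem strIsalpha_ne_empty {x : String} (h : PySem.Chars.strIsalpha x.toList = true) : x ≠ "" := by
  intro hx; subst hx; simp [PySem.Chars.strIsalpha] at h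

theorem pvExpandK_ne_empty {s : String} (h : s ≠ "") (k : Int) : pvExpandK s k ≠ "" := by
  intro hc
  apply h
  have hl := congrArg String.toList hc
  simp only [pvExpandK] at hl
  simp at hl
  exact hl.2.1

-- A's loop invariant: the remaining fold, finished off, is acc ++ the grouped results
theorem genStrings_loop (xs : List String) :
    ∀ (acc : List String) (s : String), s ≠ "" →
      (xs.foldl genStringsStep (acc, some s)).1 ++ [(xs.foldl genStringsStep (acc, some s)).2.getD ""]
        = acc ++ (pvFoldE s (pvRunKs xs).1 :: (pvRecGroups (pvRunKs xs).2).map (fun g => pvFoldE g.1 g.2)) := by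
  induction xs with
  | nil => intro acc s _; simp [pvRunKs, pvFoldE, pvRecGroups_nil]
  | cons x xs ih =>
      intro acc s hs
      by_cases hx : PySem.Chars.strIsalpha x.toList = true
      · have hx' : x ≠ "" := strIsalpha_ne_empty hx
        have step1 : genStringsStep (acc, some s) x = (acc ++ [s], some x) := by
          simp [genStringsStep, hx, hs]
        rw [List.foldl_cons, step1, ih (acc ++ [s]) x hx', pvRunKs_cons_alpha xs hx,
            pvRecGroups_cons]
        simp [pvFoldE]
      · have step1 : genStringsStep (acc, some s) x = (acc, some (pvExpandK s ((PySem.Int.ofStr? x).getD 0))) := by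
          simp [genStringsStep, hx, pvExpandK]
        rw [List.foldl_cons, step1, ih acc _ (pvExpandK_ne_empty hs _), pvRunKs_cons_not xs hx]
        simp [pvFoldE]

-- B's stage-1 loop invariant: the grouping fold computes the recursive grouping
theorem pvGroups_loop (xs : List String) :
    ∀ (gs : List (String × List Int)) (s : String) (ks : List Int),
      xs.foldl pvGroupStep (gs ++ [(s, ks)])
        = gs ++ (s, ks ++ (pvRunKs xs).1) :: pvRecGroups (pvRunKs xs).2 := by
  induction xs with
  | nil => intro gs s ks; simp [pvRunKs, pvRecGroups_nil]
  | cons x xs ih =>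
      intro gs s ks
      by_cases hx : PySem.Chars.strIsalpha x.toList = true
      · have step1 : pvGroupStep (gs ++ [(s, ks)]) x = (gs ++ [(s, ks)]) ++ [(x, [])] := by
          simp [pvGroupStep, hx]
        rw [List.foldl_cons, step1, ih (gs ++ [(s, ks)]) x [], pvRunKs_cons_alpha xs hx,
            pvRecGroups_cons]
        simp
      · have step1 : pvGroupStep (gs ++ [(s, ks)]) x
            = gs ++ [(s, ks ++ [(PySem.Int.ofStr? x).getD 0])] := by
          simp [pvGroupStep, hx]
        rw [List.foldl_cons, step1, ih gs s (ks ++ [(PySem.Int.ofStr? x).getD 0]), pvRunKs_cons_not xs hx]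
        simp

-- ===== the per-group lemma: fold of expansions = traceback construction =====

-- expansion at char-list level, with the clamped point already computed
def pvExpandL (cs : List Char) (p : Nat) : List Char := cs.take p ++ cs ++ cs.drop p

def pvFoldEL (cs : List Char) (ks : List Int) : List Char :=
  ks.foldl (fun cs k => pvExpandL cs (pvPoint cs.length (k + 1))) cs

theorem pvPoint_le (ln : Nat) (kk : Int) : pvPoint ln kk ≤ ln := by
  unfold pvPoint
  split
  · omega
  · exact Nat.min_le_right _ _

theorem take_min_length {α : Type} (l : List α) (a : Nat) : l.take (min a l.length) = l.take a := by
  rcases Nat.le_total a l.length with h | h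
  · rw [Nat.min_eq_left h]
  · rw [Nat.min_eq_right h, List.take_length, List.take_of_length_le h]

theorem drop_min_length {α : Type} (l : List α) (a : Nat) : l.drop (min a l.length) = l.drop a := by
  rcases Nat.le_total a l.length with h | h
  · rw [Nat.min_eq_left h]
  · rw [Nat.min_eq_right h, List.drop_length, List.drop_of_length_le h]

-- the string-level expansion, on char lists, is pvExpandL at the clamped point
theorem toList_pvExpandK (s : String) (k : Int) :
    (pvExpandK s k).toList = pvExpandL s.toList (pvPoint s.toList.length (k + 1)) := by
  unfold pvExpandK pvExpandL pvPoint
  by_cases hneg : k + 1 < 0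
  · have hk : k + 1 = -(((-(k+1)).toNat : Nat) : Int) := by omega
    have hpos : 0 < (-(k+1)).toNat := by omega
    rw [if_pos hneg]
    simp only [String.toList_append, PySem.Str.toList_slice, PySem.Chars.slice_eq_listSlice]
    rw [hk, PySem.List.slice_to_neg_natCast _ _ hpos, PySem.List.slice_from_neg_natCast _ _ hpos]
    have harg : ((s.toList.length : Int) + -(((-(k + 1)).toNat : Nat) : Int)).toNat
        = s.toList.length - (-(k + 1)).toNat := by omega
    rw [harg]
  · rw [if_neg hneg]
    simp only [String.toList_append, PySem.Str.toList_slice, PySem.Chars.slice_eq_listSlice]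
    rw [PySem.List.slice_to _ (by omega), PySem.List.slice_from _ (by omega),
        take_min_length, drop_min_length]

theorem toList_pvFoldE (ks : List Int) : ∀ (s : String),
    (pvFoldE s ks).toList = pvFoldEL s.toList ks := by
  induction ks with
  | nil => intro s; rfl
  | cons k ks ih =>
      intro s
      show (pvFoldE (pvExpandK s k) ks).toList = _
      rw [ih]
      simp only [pvFoldEL, List.foldl_cons]
      rw [toList_pvExpandK]

-- length bookkeeping
theorem length_pvExpandL (cs : List Char) (p : Nat) (hp : p ≤ cs.length) :
    (pvExpandL cs p).length = 2 * cs.length := by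
  simp [pvExpandL]
  omega

theorem pvPts_append (n : Nat) (ks : List Int) (k : Int) :
    pvPts n (ks ++ [k]) = pvPtsStep (pvPts n ks) k := by
  unfold pvPts
  rw [List.foldl_append]
  rfl

theorem length_pvFoldEL (ks : List Int) : ∀ (cs : List Char),
    (pvFoldEL cs ks).length = (pvPts cs.length ks).1 := by
  induction ks using List.reverseRecOn with
  | nil => intro cs; rfl
  | append_singleton ks k ih =>
      intro cs
      have : pvFoldEL cs (ks ++ [k])
          = pvExpandL (pvFoldEL cs ks) (pvPoint (pvFoldEL cs ks).length (k + 1)) := by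
        unfold pvFoldEL
        rw [List.foldl_append]
        rfl
      rw [this, length_pvExpandL _ _ (pvPoint_le _ _), pvPts_append, ih]
      simp [pvPtsStep]
      omega

-- getD over a range-map
theorem getD_range_map {α : Type} (f : Nat → α) (m j : Nat) (d : α) :
    ((List.range m).map f).getD j d = if j < m then f j else d := by
  by_cases h : j < m
  · rw [if_pos h, List.getD_eq_getElem _ _ (by simpa using h)]
    simp
  · rw [if_neg h, List.getD_eq_default _ _ (by simpa using Nat.le_of_not_lt h)]

-- one expansion, expressed by per-index traceback
theorem pvExpandL_eq_map (l : List Char) (p : Nat) (hp : p ≤ l.length) (d : Char) :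
    pvExpandL l p = (List.range (2 * l.length)).map (fun i => l.getD (pvTraceStep i (l.length, p)) d) := by
  apply List.ext_getElem
  · rw [length_pvExpandL _ _ hp]; simp
  · intro i h1 h2
    rw [length_pvExpandL _ _ hp] at h1
    rw [List.getElem_map, List.getElem_range]
    unfold pvExpandL pvTraceStep
    simp only
    by_cases c1 : i < p
    · rw [if_pos c1]
      rw [List.getElem_append_left (by simp; omega), List.getElem_append_left (by simp; omega),
          List.getElem_take]
      rw [List.getD_eq_getElem _ _ (by omega)]
    · rw [if_neg c1]
      by_cases c2 : i < p + l.length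
      · rw [if_pos c2]
        rw [List.getElem_append_left (by simp; omega), List.getElem_append_right (by simp; omega)]
        simp only [List.length_take]
        rw [List.getD_eq_getElem _ _ (by omega)]
        congr 1
        omega
      · rw [if_neg c2]
        rw [List.getElem_append_right (by simp; omega)]
        rw [List.getElem_drop, List.getD_eq_getElem _ _ (by omega)]
        congr 1
        simp
        omega

theorem pvTrace_append (pts : List (Nat × Nat)) (x : Nat × Nat) (i : Nat) :
    pvTrace (pts ++ [x]) i = pvTrace pts (pvTraceStep i x) := by
  unfold pvTrace
  rw [List.reverse_append]
  rfl

theorem pvTraceStep_lt (m p i : Nat) (hp : p ≤ m) (hi : i < 2 * m) : pvTraceStep i (m, p) < m := by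
  unfold pvTraceStep
  simp only
  split
  · omega
  · split <;> omega

-- the main per-group identity: folding the expansions = tracing every index back
theorem pvFoldEL_eq_map (ks : List Int) : ∀ (cs : List Char),
    pvFoldEL cs ks
      = (List.range (pvPts cs.length ks).1).map
          (fun i => cs.getD (pvTrace (pvPts cs.length ks).2 i) 'a') := by
  induction ks using List.reverseRecOn with
  | nil =>
      intro cs
      show cs = (List.range cs.length).map (fun i => cs.getD (i) 'a')
      apply List.ext_getElem
      · simp
      · intro i h1 h2
        rw [List.getElem_map, List.getElem_range, List.getD_eq_getElem _ _ (by simpa using h1)]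
  | append_singleton ks k ih =>
      intro cs
      have hstep : pvFoldEL cs (ks ++ [k])
          = pvExpandL (pvFoldEL cs ks) (pvPoint (pvFoldEL cs ks).length (k + 1)) := by
        unfold pvFoldEL
        rw [List.foldl_append]
        rfl
      set m := (pvPts cs.length ks).1 with hm
      have hlen : (pvFoldEL cs ks).length = m := length_pvFoldEL ks cs
      have hp : pvPoint m (k + 1) ≤ m := pvPoint_le _ _
      rw [hstep, hlen, pvExpandL_eq_map _ _ (by rw [hlen]; exact hp) 'a', hlen]
      rw [pvPts_append]
      simp only [pvPtsStep]
      rw [Nat.mul_comm m 2]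
      apply List.map_congr_left
      intro i hi
      rw [List.mem_range] at hi
      rw [ih cs, getD_range_map, if_pos (pvTraceStep_lt m _ i hp hi), pvTrace_append]

-- lift to strings
theorem pvGroupString_eq_pvFoldE (s : String) (ks : List Int) :
    pvGroupString (s, ks) = pvFoldE s ks := by
  have h1 := toList_pvFoldE ks s
  have h2 := pvFoldEL_eq_map ks s.toList
  unfold pvGroupString
  simp only
  apply String.ext
  rw [String.toList_ofList, ← h2, ← h1]

-- B = map of per-group folds over the recursive grouping, for letter-headed input
theorem genStrings_alt_eq (x : String) (xs : List String)
    (hx : PySem.Chars.strIsalpha x.toList = true) :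
    genStrings_alt (x :: xs)
      = pvFoldE x (pvRunKs xs).1 :: (pvRecGroups (pvRunKs xs).2).map (fun g => pvFoldE g.1 g.2) := by
  unfold genStrings_alt pvGroups
  rw [List.foldl_cons]
  have step0 : pvGroupStep [] x = [] ++ [(x, [])] := by simp [pvGroupStep, hx]
  rw [step0, pvGroups_loop xs [] x []]
  simp only [List.nil_append, List.map_cons, List.nil_append]
  rw [pvGroupString_eq_pvFoldE]
  congr 1
  apply List.map_congr_left
  intro g _
  exact pvGroupString_eq_pvFoldE g.1 g.2

-- ===== VERDICT (by name: the statement is the Claim_ definition above) =====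
theorem genStrings_spec : Claim_equal_genStrings := by
  intro inp _ hpre
  obtain ⟨hne, hhead, _⟩ := hpre
  match inp with
  | [] => exact absurd rfl hne
  | x :: xs =>
      have hx : PySem.Chars.strIsalpha x.toList = true := by simpa using hhead
      show ((x :: xs).foldl genStringsStep ([], none)).1 ++ [((x :: xs).foldl genStringsStep ([], none)).2.getD ""] = genStrings_alt (x :: xs)
      have step0 : genStringsStep ([], none) x = ([], some x) := by
        simp [genStringsStep, hx]
      rw [List.foldl_cons, step0, genStrings_loop xs [] x (strIsalpha_ne_empty hx),
          genStrings_alt_eq x xs hx]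
      simp
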